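-- pv_equiv track=rewrite | github.com/JaeheeRyu/Coding_Test | 5.py | maxShared
-- ===== SOURCE A (Python) =====
-- def maxShared(friends_nodes, friends_from, friends_to, friends_weight):
--     con = list(zip(friends_from,friends_to))
--     con1 = []
--     for i in range(len(con)):
--         if con[i][0] > con[i][1]:
--             con[i] = (con[i][1],con[i][0])
--     new_con = set(con)
--     re = []
--     for i in new_con:
--         re.append(con.count(i))
--     m = max(re)
--     re2=[]
--     for i in new_con:
--         if con.count(i) == m:
--             re2.append(i[0]*i[1])
--     return max(re2)
-- ===== SOURCE B (Python) =====
-- def maxShared(friends_nodes, friends_from, friends_to, friends_weight):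
--     # Sort the normalized edges, then sweep once grouping runs of equal
--     # adjacent edges into (edge, run length) pairs; answer from the runs.
--     edges = sorted((u, v) if u <= v else (v, u) for u, v in zip(friends_from, friends_to))
--     n = len(edges)
--     runs = []
--     i = 0
--     while i < n:
--         k = 1
--         while i + k < n and edges[i + k] == edges[i]:
--             k += 1
--         runs.append((edges[i], k))
--         i += k
--     m = max(c for _, c in runs)
--     return max(e[0] * e[1] for e, c in runs if c == m)
-- ===== Notes on version B (the rewrite author's own statement) =====
-- stated objective: faster
-- what changed: Replaces A's set construction with repeated con.count scans (one full scan per distinct edge, twice) by sorting the normalized edge list once and sweeping it in a single pass that groups runs of equal adjacent edges into (edge, run length) records.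
import Mathlib
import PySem

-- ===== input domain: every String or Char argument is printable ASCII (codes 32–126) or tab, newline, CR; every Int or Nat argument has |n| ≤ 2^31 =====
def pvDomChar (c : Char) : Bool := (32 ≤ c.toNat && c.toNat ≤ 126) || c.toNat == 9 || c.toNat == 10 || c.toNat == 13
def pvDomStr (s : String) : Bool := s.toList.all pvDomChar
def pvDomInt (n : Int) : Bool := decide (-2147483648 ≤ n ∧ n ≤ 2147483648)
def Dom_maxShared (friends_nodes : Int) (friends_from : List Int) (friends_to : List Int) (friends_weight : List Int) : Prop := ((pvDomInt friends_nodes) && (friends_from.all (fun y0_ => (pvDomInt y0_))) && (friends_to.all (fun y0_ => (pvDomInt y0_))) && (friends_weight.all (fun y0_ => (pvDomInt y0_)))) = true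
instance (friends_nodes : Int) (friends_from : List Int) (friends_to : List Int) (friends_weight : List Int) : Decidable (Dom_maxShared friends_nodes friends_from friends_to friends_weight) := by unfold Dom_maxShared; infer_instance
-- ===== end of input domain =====

-- B sorts the normalized edges and sweeps the sorted list once, grouping runs of equal
-- adjacent edges, instead of A's set construction with repeated con.count scans (objective: faster).

-- ===== PORT A =====
def maxShared (friends_nodes : Int) (friends_from : List Int) (friends_to : List Int) (friends_weight : List Int) : Int :=
  let con0 := friends_from.zip friends_to
  -- for i in range(len(con)): if con[i][0] > con[i][1]: con[i] = (con[i][1], con[i][0])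
  let con := (PySem.List.pyRange 0 (con0.length : Int) 1).foldl
    (fun c i =>
      if (PySem.List.pyGetD c i ((0 : Int), (0 : Int))).1 > (PySem.List.pyGetD c i ((0 : Int), (0 : Int))).2 then
        PySem.List.pySetD c i ((PySem.List.pyGetD c i ((0 : Int), (0 : Int))).2, (PySem.List.pyGetD c i ((0 : Int), (0 : Int))).1)
      else c) con0
  let new_con := PySem.Set.ofList con
  let re := new_con.map (fun i => (con.count i : Int))
  let m := (PySem.List.max? re (fun x => x)).getD 0   -- max(re); A raises ValueError when re = [] (excluded by Pre_)
  let re2 := (new_con.filter (fun i => (con.count i : Int) == m)).map (fun i => i.1 * i.2)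
  (PySem.List.max? re2 (fun x => x)).getD 0           -- max(re2)

-- ===== PORT B =====
-- the inner `while … edges[i+k] == edges[i]` / `i += k` sweep of Source B: consume one run of
-- equal adjacent edges per step, recording (edge, run length)
def pvGroupRuns : List (Int × Int) → List ((Int × Int) × Int)
  | [] => []
  | e :: t =>
    (e, 1 + ((t.takeWhile (fun x => x == e)).length : Int)) ::
      pvGroupRuns (t.dropWhile (fun x => x == e))
termination_by l => l.length
decreasing_by
  simp only [List.length_cons]
  exact Nat.lt_succ_of_le (List.length_dropWhile_le _ _)

def maxShared_alt (friends_nodes : Int) (friends_from : List Int) (friends_to : List Int) (friends_weight : List Int) : Int :=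
  let edges := PySem.List.sorted2
    ((friends_from.zip friends_to).map (fun uv => if uv.1 ≤ uv.2 then uv else (uv.2, uv.1)))
    Prod.fst Prod.snd false
  let runs := pvGroupRuns edges
  let m := (PySem.List.max? (runs.map (fun r => r.2)) (fun x => x)).getD 0   -- max(...); raises when runs = [] (excluded by Pre_)
  (PySem.List.max? ((runs.filter (fun r => r.2 == m)).map (fun r => r.1.1 * r.1.2)) (fun x => x)).getD 0

-- ===== PRECONDITION & SPEC =====
-- A (and B) raise ValueError (max() of an empty sequence) exactly when zip(friends_from, friends_to) is empty.
def Pre_maxShared (friends_nodes : Int) (friends_from : List Int) (friends_to : List Int) (friends_weight : List Int) : Prop :=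
  friends_from ≠ [] ∧ friends_to ≠ []
instance (friends_nodes : Int) (friends_from : List Int) (friends_to : List Int) (friends_weight : List Int) : Decidable (Pre_maxShared friends_nodes friends_from friends_to friends_weight) := by unfold Pre_maxShared; infer_instance

def pvWitness_maxShared : Int × List Int × List Int × List Int := (4, [1, 2, 1], [2, 1, 3], [0, 0, 0])

def Spec_maxShared (friends_nodes : Int) (friends_from : List Int) (friends_to : List Int) (friends_weight : List Int) (out : Int) : Prop := out = maxShared_alt friends_nodes friends_from friends_to friends_weight
instance (friends_nodes : Int) (friends_from : List Int) (friends_to : List Int) (friends_weight : List Int) (out : Int) : Decidable (Spec_maxShared friends_nodes friends_from friends_to friends_weight out) := by unfold Spec_maxShared; infer_instance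

-- ===== CLAIM (what is proved, stated in full; the proofs are below) =====
def Claim_equal_maxShared : Prop := ∀ (friends_nodes : Int) (friends_from : List Int) (friends_to : List Int) (friends_weight : List Int), Dom_maxShared friends_nodes friends_from friends_to friends_weight → Pre_maxShared friends_nodes friends_from friends_to friends_weight → Spec_maxShared friends_nodes friends_from friends_to friends_weight (maxShared friends_nodes friends_from friends_to friends_weight)

-- ===== LEMMAS AND PROOFS =====

def pvNorm (p : Int × Int) : Int × Int := if p.1 > p.2 then (p.2, p.1) else p

-- A's index loop writes pvNorm con[i] back at each position: it is map pvNorm.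
lemma pvNormLoop : ∀ (post pre : List (Int × Int)),
    (PySem.List.pyRange (pre.length : Int) ((pre.length + post.length : Nat) : Int) 1).foldl
      (fun c i =>
        if (PySem.List.pyGetD c i ((0 : Int), (0 : Int))).1 > (PySem.List.pyGetD c i ((0 : Int), (0 : Int))).2 then
          PySem.List.pySetD c i ((PySem.List.pyGetD c i ((0 : Int), (0 : Int))).2, (PySem.List.pyGetD c i ((0 : Int), (0 : Int))).1)
        else c) (pre ++ post)
    = pre ++ post.map pvNorm := by
  intro post
  induction post with
  | nil =>
    intro pre
    rw [PySem.List.pyRange_one_eq_nil (by simp)]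
    simp
  | cons x t ih =>
    intro pre
    rw [PySem.List.pyRange_one_cons (by simp only [List.length_cons]; push_cast; omega)]
    have hget : PySem.List.pyGetD (pre ++ x :: t) (pre.length : Int) ((0 : Int), (0 : Int)) = x := by
      rw [PySem.List.pyGetD_natCast]
      simp [List.getD]
    have hset : ∀ v, PySem.List.pySetD (pre ++ x :: t) (pre.length : Int) v = pre ++ v :: t := by
      intro v
      rw [PySem.List.pySetD_natCast]
      rw [List.set_append_right _ _ (le_refl _)]
      simp
    have hstep :
        (if (PySem.List.pyGetD (pre ++ x :: t) ((pre.length : Int)) ((0 : Int), (0 : Int))).1 > (PySem.List.pyGetD (pre ++ x :: t) ((pre.length : Int)) ((0 : Int), (0 : Int))).2 then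
          PySem.List.pySetD (pre ++ x :: t) ((pre.length : Int)) ((PySem.List.pyGetD (pre ++ x :: t) ((pre.length : Int)) ((0 : Int), (0 : Int))).2, (PySem.List.pyGetD (pre ++ x :: t) ((pre.length : Int)) ((0 : Int), (0 : Int))).1)
        else (pre ++ x :: t)) = (pre ++ [pvNorm x]) ++ t := by
      rw [hget]
      unfold pvNorm
      by_cases h : x.1 > x.2
      · rw [if_pos h, if_pos h, hset]; simp
      · rw [if_neg h, if_neg h]; simp
    have hb : ((pre.length + (x :: t).length : Nat) : Int) = (((pre ++ [pvNorm x]).length + t.length : Nat) : Int) := by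
      simp; omega
    have ha : (pre.length : Int) + 1 = (((pre ++ [pvNorm x]).length : Nat) : Int) := by
      simp
    simp only [List.foldl_cons]
    rw [hstep, hb, ha, ih (pre ++ [pvNorm x])]
    simp

-- the lexicographic order Python uses on pairs, and sorted2's comparison function
def pvLexle (a b : Int × Int) : Prop := a.1 < b.1 ∨ (a.1 = b.1 ∧ a.2 ≤ b.2)

def pvBlt (a b : Int × Int) : Bool :=
  decide (a.1 < b.1) || (!decide (b.1 < a.1) && decide (a.2 < b.2))

lemma pvLexle_of_blt {a b : Int × Int} (h : pvBlt a b = true) : pvLexle a b := by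
  unfold pvBlt at h; unfold pvLexle
  simp only [Bool.or_eq_true, Bool.and_eq_true, Bool.not_eq_true', decide_eq_true_eq,
    decide_eq_false_iff_not] at h
  omega

lemma pvLexle_of_not_blt {a b : Int × Int} (h : pvBlt a b = false) : pvLexle b a := by
  unfold pvBlt at h; unfold pvLexle
  simp only [Bool.or_eq_false_iff, Bool.and_eq_false_iff, Bool.not_eq_false', decide_eq_true_eq,
    decide_eq_false_iff_not] at h
  omega

lemma pvLexle_trans {a b c : Int × Int} (h1 : pvLexle a b) (h2 : pvLexle b c) : pvLexle a c := by
  unfold pvLexle at *; omega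

lemma pvLexle_antisymm {a b : Int × Int} (h1 : pvLexle a b) (h2 : pvLexle b a) : a = b := by
  unfold pvLexle at *
  obtain ⟨a1, a2⟩ := a; obtain ⟨b1, b2⟩ := b
  simp only [Prod.mk.injEq]
  dsimp only at h1 h2
  omega

lemma pairwise_insertBy (x : Int × Int) :
    ∀ (acc : List (Int × Int)), acc.Pairwise pvLexle →
      (PySem.List.insertBy pvBlt x acc).Pairwise pvLexle := by
  intro acc
  induction acc with
  | nil => intro _; simp [PySem.List.insertBy]
  | cons y ys ih =>
    intro h
    rw [List.pairwise_cons] at h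
    obtain ⟨hy, hys⟩ := h
    simp only [PySem.List.insertBy]
    by_cases hb : pvBlt x y = true
    · rw [if_pos hb]
      refine List.Pairwise.cons ?_ (List.Pairwise.cons hy hys)
      intro z hz
      rcases List.mem_cons.mp hz with rfl | hz
      · exact pvLexle_of_blt hb
      · exact pvLexle_trans (pvLexle_of_blt hb) (hy z hz)
    · rw [if_neg hb]
      refine List.Pairwise.cons ?_ (ih hys)
      intro z hz
      rcases (PySem.List.mem_insertBy pvBlt x z ys).mp hz with rfl | hz
      · exact pvLexle_of_not_blt (Bool.not_eq_true _ ▸ hb)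
      · exact hy z hz

lemma pairwise_foldl_insertBy :
    ∀ (xs acc : List (Int × Int)), acc.Pairwise pvLexle →
      (xs.foldl (fun acc x => PySem.List.insertBy pvBlt x acc) acc).Pairwise pvLexle := by
  intro xs
  induction xs with
  | nil => intro acc h; exact h
  | cons x t ih =>
    intro acc h
    exact ih _ (pairwise_insertBy x acc h)

lemma sorted2_pairwise_lex (xs : List (Int × Int)) :
    (PySem.List.sorted2 xs Prod.fst Prod.snd false).Pairwise pvLexle := by
  exact pairwise_foldl_insertBy xs [] List.Pairwise.nil

lemma dropWhile_head_false {α : Type} (p : α → Bool) :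
    ∀ (l : List α) {f : α} {r : List α}, l.dropWhile p = f :: r → p f = false := by
  intro l
  induction l with
  | nil => intro f r h; simp [List.dropWhile] at h
  | cons a t ih =>
    intro f r h
    rw [List.dropWhile_cons] at h
    by_cases ha : p a = true
    · rw [if_pos ha] at h; exact ih h
    · rw [if_neg ha] at h
      obtain ⟨rfl, -⟩ := List.cons.injEq .. ▸ h
      exact Bool.not_eq_true _ ▸ ha

-- the run sweep on a lexicographically ordered list yields each distinct edge once,
-- paired with its count in the whole list
lemma groupRuns_spec :
    ∀ (l : List (Int × Int)), l.Pairwise pvLexle →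
      pvGroupRuns l
          = ((pvGroupRuns l).map Prod.fst).map (fun e => (e, (l.count e : Int)))
        ∧ ((pvGroupRuns l).map Prod.fst).Nodup
        ∧ (∀ x, x ∈ (pvGroupRuns l).map Prod.fst ↔ x ∈ l) := by
  intro l
  induction l using pvGroupRuns.induct with
  | case1 => intro _; exact ⟨by simp [pvGroupRuns], by simp [pvGroupRuns], by simp [pvGroupRuns]⟩
  | case2 e t ih =>
    intro h
    simp only [pvGroupRuns]
    have ht : t.takeWhile (fun x => x == e) ++ t.dropWhile (fun x => x == e) = t :=
      List.takeWhile_append_dropWhile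
    set t1 := t.takeWhile (fun x => x == e) with ht1
    set t2 := t.dropWhile (fun x => x == e) with ht2
    rw [List.pairwise_cons] at h
    obtain ⟨he, hpt⟩ := h
    have h1 : ∀ x ∈ t1, x = e := by
      intro x hx
      have := List.mem_takeWhile_imp hx
      exact beq_iff_eq.mp this
    have hp2 : t2.Pairwise pvLexle :=
      List.Pairwise.sublist (List.dropWhile_sublist _) hpt
    have he2 : e ∉ t2 := by
      intro hmem
      cases hd : t2 with
      | nil => rw [hd] at hmem; exact absurd hmem (List.not_mem_nil)
      | cons f r =>
        have hf : (f == e) = false :=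
          dropWhile_head_false (fun x => x == e) t (by rw [← ht2]; exact hd)
        have hfe : f ≠ e := by simpa using hf
        have hft : f ∈ t := (List.dropWhile_sublist _).mem (hd ▸ List.mem_cons_self)
        have hef : pvLexle e f := he f hft
        rw [hd] at hmem
        rcases List.mem_cons.mp hmem with rfl | hmem'
        · exact hfe rfl
        · have hfe2 : pvLexle f e := by
            rw [hd] at hp2
            exact (List.pairwise_cons.mp hp2).1 e hmem'
          exact hfe (pvLexle_antisymm hfe2 hef)
    have hcnt1 : t1.count e = t1.length := by
      rw [List.count_eq_length]
      intro b hb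
      exact (h1 b hb).symm
    have hcnte : (e :: t).count e = t1.length + 1 := by
      have hz2 : t2.count e = 0 := List.count_eq_zero.mpr he2
      rw [← ht]
      simp [List.count_append, hcnt1, hz2]
    have hcntx : ∀ x, x ≠ e → (e :: t).count x = t2.count x := by
      intro x hx
      have h0 : t1.count x = 0 := by
        rw [List.count_eq_zero]
        intro hmem
        exact hx (h1 x hmem)
      rw [← ht]
      simp [List.count_append, h0, Ne.symm hx]
    obtain ⟨ihEq, ihNd, ihMem⟩ := ih hp2
    have hsub2 : ∀ x ∈ (pvGroupRuns t2).map Prod.fst, x ∈ t2 := fun x hx => (ihMem x).mp hx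
    have hne : ∀ x ∈ (pvGroupRuns t2).map Prod.fst, x ≠ e := by
      intro x hx hxe
      exact he2 (hxe ▸ hsub2 x hx)
    refine ⟨?_, ?_, ?_⟩
    · rw [List.map_cons, List.map_cons]
      congr 1
      · rw [hcnte]; push_cast; ring_nf
      · conv_lhs => rw [ihEq]
        apply List.map_congr_left
        intro x hx
        rw [hcntx x (hne x hx)]
    · rw [List.map_cons]
      exact List.nodup_cons.mpr ⟨fun hx => (hne e hx) rfl, ihNd⟩
    · intro x
      rw [List.map_cons]
      simp only [List.mem_cons, ihMem]
      constructor
      · rintro (rfl | hx)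
        · exact Or.inl rfl
        · exact Or.inr ((List.dropWhile_sublist _).mem hx)
      · rintro (rfl | hx)
        · exact Or.inl rfl
        · rw [← ht] at hx
          rcases List.mem_append.mp hx with hx1 | hx2
          · exact Or.inl (h1 x hx1)
          · exact Or.inr hx2

-- the VALUE of max(xs) depends only on the multiset of elements
lemma maxD_perm {xs ys : List Int} (h : xs.Perm ys) :
    (PySem.List.max? xs (fun x => x)).getD 0 = (PySem.List.max? ys (fun x => x)).getD 0 := by
  cases hx : PySem.List.max? xs (fun x => x) with
  | none =>
    have hxs : xs = [] := (PySem.List.max?_eq_none_iff _ _).mp hx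
    subst hxs
    have hys : ys = [] := List.perm_nil.mp h.symm
    subst hys
    simp [PySem.List.max?]
  | some mx =>
    cases hy : PySem.List.max? ys (fun x => x) with
    | none =>
      have hys : ys = [] := (PySem.List.max?_eq_none_iff _ _).mp hy
      subst hys
      have hxs : xs = [] := List.perm_nil.mp h
      subst hxs
      simp [PySem.List.max?] at hx
    | some my =>
      have h1 : mx ≤ my := PySem.List.max?_isMax hy mx (h.mem_iff.mp (PySem.List.max?_mem hx))
      have h2 : my ≤ mx := PySem.List.max?_isMax hx my (h.symm.mem_iff.mp (PySem.List.max?_mem hy))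
      simp [le_antisymm h1 h2]

theorem maxShared_spec : Claim_equal_maxShared := by
  intro fn ff ft fw _ _
  unfold Spec_maxShared maxShared maxShared_alt
  dsimp only
  have hloop := pvNormLoop (ff.zip ft) []
  simp only [List.nil_append, List.length_nil, Nat.zero_add, Nat.cast_zero] at hloop
  rw [hloop]
  have hmap : (ff.zip ft).map (fun uv => if uv.1 ≤ uv.2 then uv else (uv.2, uv.1))
      = (ff.zip ft).map pvNorm := by
    apply List.map_congr_left
    intro uv _
    unfold pvNorm
    by_cases h : uv.1 ≤ uv.2
    · rw [if_pos h, if_neg (not_lt.mpr h)]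
    · rw [if_neg h, if_pos (not_le.mp h)]
  rw [hmap]
  set L := (ff.zip ft).map pvNorm with hL
  set edges := PySem.List.sorted2 L Prod.fst Prod.snd false with hedges
  have hP : edges.Pairwise pvLexle := sorted2_pairwise_lex L
  have hperm : edges.Perm L := PySem.List.sorted2_perm L Prod.fst Prod.snd false
  obtain ⟨hEq, hNd, hMem⟩ := groupRuns_spec edges hP
  set K := (pvGroupRuns edges).map Prod.fst with hK
  have hcnt : ∀ x, edges.count x = L.count x := hperm.count_eq
  have hKS : K.Perm (PySem.Set.ofList L) := by
    rw [List.perm_ext_iff_of_nodup hNd (PySem.Set.nodup_ofList L)]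
    intro a
    rw [PySem.Set.mem_ofList]
    rw [hMem a, hperm.mem_iff]
  -- the run counts are a permutation of A's list `re`
  have hvals : ((pvGroupRuns edges).map (fun r => r.2)).Perm
      ((PySem.Set.ofList L).map (fun i => (L.count i : Int))) := by
    conv_lhs => rw [hEq]
    rw [List.map_map]
    have : ((fun r : (Int × Int) × Int => r.2) ∘ fun e => (e, (edges.count e : Int)))
        = fun e => (L.count e : Int) := by
      funext e; simp [hcnt e]
    rw [this]
    exact hKS.map _
  rw [maxD_perm hvals]
  set m := (PySem.List.max? ((PySem.Set.ofList L).map fun i => (L.count i : Int)) (fun x => x)).getD 0 with hm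
  -- the filtered products are a permutation of A's list `re2`
  have hprods : (((pvGroupRuns edges).filter (fun r => r.2 == m)).map (fun r => r.1.1 * r.1.2)).Perm
      ((((PySem.Set.ofList L).filter (fun i => (L.count i : Int) == m)).map (fun i => i.1 * i.2))) := by
    conv_lhs => rw [hEq]
    rw [List.filter_map, List.map_map]
    have hcomp : ((fun r : (Int × Int) × Int => r.2 == m) ∘ fun e => (e, (edges.count e : Int)))
        = fun e => (L.count e : Int) == m := by
      funext e; simp [hcnt e]
    rw [hcomp]
    have hcomp2 : ((fun r : (Int × Int) × Int => r.1.1 * r.1.2) ∘ fun e => (e, (edges.count e : Int)))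
        = fun e : Int × Int => e.1 * e.2 := by
      funext e; rfl
    rw [hcomp2]
    exact (hKS.filter _).map _
  rw [maxD_perm hprods]
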